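-- pv_equiv track=rewrite | github.com/harman23227/projectco | assembler.py | get_get
-- ===== SOURCE A (Python) =====
-- def get_get(line):
--     s = ''
--     for i in range(len(line)):
--         if i == 0:
--             if line[i] in "ABCDEFGHIJKLMNOPQRSTUVWXYZabcdefghijklmnopqrstuvwxyz_":
--                 s += line[i]
--             else:
--                 return None
--                 break
--         else:
--             if line[i] in "ABCDEFGHIJKLMNOPQRSTUVWXYZ1234567890abcdefghijklmnopqrstuvwxyz_":
--                 s += line[i]
--                 continue
--             elif line[i] == ':':
--                 return s
--                 break
--             else:
--                 return None
--                 break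
--     return None
-- ===== SOURCE B (Python) =====
-- import re
--
-- _LABEL = re.compile(r'([A-Za-z_][A-Za-z0-9_]*):')
--
-- def get_get(line):
--     m = _LABEL.match(line)
--     return m.group(1) if m else None
-- ===== Notes on version B (the rewrite author's own statement) =====
-- stated objective: idiomatic
-- what changed: Replaced the explicit index loop with string accumulator and per-character branching by a single anchored regex match r'([A-Za-z_][A-Za-z0-9_]*):' whose capture group is returned.
import Mathlib
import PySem

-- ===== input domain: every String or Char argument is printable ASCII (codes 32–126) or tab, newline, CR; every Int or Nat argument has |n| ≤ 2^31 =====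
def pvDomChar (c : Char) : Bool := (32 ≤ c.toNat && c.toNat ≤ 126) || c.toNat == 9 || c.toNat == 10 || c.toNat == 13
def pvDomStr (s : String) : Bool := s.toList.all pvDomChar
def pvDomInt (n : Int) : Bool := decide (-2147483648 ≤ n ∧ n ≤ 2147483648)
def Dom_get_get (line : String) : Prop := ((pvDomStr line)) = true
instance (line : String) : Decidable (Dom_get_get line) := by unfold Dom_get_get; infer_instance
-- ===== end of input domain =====

-- B replaces A's explicit char-by-char accumulator loop with a single anchored regex match
-- whose capture group is the returned identifier (idiomatic rewrite, same cost).


-- ===== PORT A =====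
-- A's membership tests `line[i] in "…"` are `contains` on those literal character strings.
def pvStartCharsA : List Char :=
  "ABCDEFGHIJKLMNOPQRSTUVWXYZabcdefghijklmnopqrstuvwxyz_".toList
def pvContCharsA : List Char :=
  "ABCDEFGHIJKLMNOPQRSTUVWXYZ1234567890abcdefghijklmnopqrstuvwxyz_".toList

-- A's loop over range(len(line)): `first` encodes the i == 0 branch, `s` is the accumulator.
def pvLoopA : List Char → Bool → String → Option String
  | [], _, _ => none
  | c :: rest, true, s =>
      if pvStartCharsA.contains c then pvLoopA rest false (s.push c) else none
  | c :: rest, false, s =>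
      if pvContCharsA.contains c then pvLoopA rest false (s.push c)
      else if c = ':' then some s
      else none

def get_get (line : String) : Option String := pvLoopA line.toList true ""

-- ===== PORT B =====
-- B's regex character classes [A-Za-z_] and [A-Za-z0-9_], as the ranges the regex states.
def pvIsStartB (c : Char) : Bool :=
  ('A' ≤ c && c ≤ 'Z') || ('a' ≤ c && c ≤ 'z') || c = '_'
def pvIsContB (c : Char) : Bool :=
  ('A' ≤ c && c ≤ 'Z') || ('a' ≤ c && c ≤ 'z') || ('0' ≤ c && c ≤ '9') || c = '_'

-- Anchored match of ([A-Za-z_][A-Za-z0-9_]*): — one start char, the maximal run of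
-- continuation chars (takeWhile), then ':' immediately after; the capture group is returned.
def get_get_alt (line : String) : Option String :=
  match line.toList with
  | [] => none
  | c :: rest =>
      if pvIsStartB c then
        if (rest.dropWhile pvIsContB).head? = some ':' then
          some (String.ofList (c :: rest.takeWhile pvIsContB))
        else none
      else none

-- ===== PRECONDITION & SPEC =====
def Spec_get_get (line : String) (out : Option String) : Prop := out = get_get_alt line
instance (line : String) (out : Option String) : Decidable (Spec_get_get line out) := by unfold Spec_get_get; infer_instance

-- ===== CLAIM (what is proved, stated in full; the proofs are below) =====
def Claim_equal_get_get : Prop := ∀ (line : String), Dom_get_get line → Spec_get_get line (get_get line)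

-- ===== LEMMAS AND PROOFS =====

theorem pv_chr_eq (c d : Char) : (c = d) ↔ c.toNat = d.toNat := by
  constructor
  · rintro rfl; rfl
  · intro h; exact Char.ext (UInt32.toNat_inj.mp h)

theorem pv_chr_le (c d : Char) : (c ≤ d) ↔ c.toNat ≤ d.toNat := Iff.rfl

theorem pv_start_mem (c : Char) : (c ∈ pvStartCharsA) ↔ pvIsStartB c = true := by
  have h1 : pvStartCharsA = ['A','B','C','D','E','F','G','H','I','J','K','L','M','N','O','P','Q','R','S','T','U','V','W','X','Y','Z','a','b','c','d','e','f','g','h','i','j','k','l','m','n','o','p','q','r','s','t','u','v','w','x','y','z','_'] := by decide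
  rw [h1]
  simp only [pvIsStartB, List.mem_cons, List.not_mem_nil, or_false,
    pv_chr_eq, pv_chr_le, Bool.or_eq_true, Bool.and_eq_true, decide_eq_true_eq,
    show ('A':Char).toNat = 65 from rfl,
    show ('B':Char).toNat = 66 from rfl,
    show ('C':Char).toNat = 67 from rfl,
    show ('D':Char).toNat = 68 from rfl,
    show ('E':Char).toNat = 69 from rfl,
    show ('F':Char).toNat = 70 from rfl,
    show ('G':Char).toNat = 71 from rfl,
    show ('H':Char).toNat = 72 from rfl,
    show ('I':Char).toNat = 73 from rfl,
    show ('J':Char).toNat = 74 from rfl,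
    show ('K':Char).toNat = 75 from rfl,
    show ('L':Char).toNat = 76 from rfl,
    show ('M':Char).toNat = 77 from rfl,
    show ('N':Char).toNat = 78 from rfl,
    show ('O':Char).toNat = 79 from rfl,
    show ('P':Char).toNat = 80 from rfl,
    show ('Q':Char).toNat = 81 from rfl,
    show ('R':Char).toNat = 82 from rfl,
    show ('S':Char).toNat = 83 from rfl,
    show ('T':Char).toNat = 84 from rfl,
    show ('U':Char).toNat = 85 from rfl,
    show ('V':Char).toNat = 86 from rfl,
    show ('W':Char).toNat = 87 from rfl,
    show ('X':Char).toNat = 88 from rfl,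
    show ('Y':Char).toNat = 89 from rfl,
    show ('Z':Char).toNat = 90 from rfl,
    show ('a':Char).toNat = 97 from rfl,
    show ('b':Char).toNat = 98 from rfl,
    show ('c':Char).toNat = 99 from rfl,
    show ('d':Char).toNat = 100 from rfl,
    show ('e':Char).toNat = 101 from rfl,
    show ('f':Char).toNat = 102 from rfl,
    show ('g':Char).toNat = 103 from rfl,
    show ('h':Char).toNat = 104 from rfl,
    show ('i':Char).toNat = 105 from rfl,
    show ('j':Char).toNat = 106 from rfl,
    show ('k':Char).toNat = 107 from rfl,
    show ('l':Char).toNat = 108 from rfl,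
    show ('m':Char).toNat = 109 from rfl,
    show ('n':Char).toNat = 110 from rfl,
    show ('o':Char).toNat = 111 from rfl,
    show ('p':Char).toNat = 112 from rfl,
    show ('q':Char).toNat = 113 from rfl,
    show ('r':Char).toNat = 114 from rfl,
    show ('s':Char).toNat = 115 from rfl,
    show ('t':Char).toNat = 116 from rfl,
    show ('u':Char).toNat = 117 from rfl,
    show ('v':Char).toNat = 118 from rfl,
    show ('w':Char).toNat = 119 from rfl,
    show ('x':Char).toNat = 120 from rfl,
    show ('y':Char).toNat = 121 from rfl,
    show ('z':Char).toNat = 122 from rfl,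
    show ('_':Char).toNat = 95 from rfl]
  omega

theorem pv_cont_mem (c : Char) : (c ∈ pvContCharsA) ↔ pvIsContB c = true := by
  have h1 : pvContCharsA = ['A','B','C','D','E','F','G','H','I','J','K','L','M','N','O','P','Q','R','S','T','U','V','W','X','Y','Z','1','2','3','4','5','6','7','8','9','0','a','b','c','d','e','f','g','h','i','j','k','l','m','n','o','p','q','r','s','t','u','v','w','x','y','z','_'] := by decide
  rw [h1]
  simp only [pvIsContB, List.mem_cons, List.not_mem_nil, or_false,
    pv_chr_eq, pv_chr_le, Bool.or_eq_true, Bool.and_eq_true, decide_eq_true_eq,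
    show ('A':Char).toNat = 65 from rfl,
    show ('B':Char).toNat = 66 from rfl,
    show ('C':Char).toNat = 67 from rfl,
    show ('D':Char).toNat = 68 from rfl,
    show ('E':Char).toNat = 69 from rfl,
    show ('F':Char).toNat = 70 from rfl,
    show ('G':Char).toNat = 71 from rfl,
    show ('H':Char).toNat = 72 from rfl,
    show ('I':Char).toNat = 73 from rfl,
    show ('J':Char).toNat = 74 from rfl,
    show ('K':Char).toNat = 75 from rfl,
    show ('L':Char).toNat = 76 from rfl,
    show ('M':Char).toNat = 77 from rfl,
    show ('N':Char).toNat = 78 from rfl,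
    show ('O':Char).toNat = 79 from rfl,
    show ('P':Char).toNat = 80 from rfl,
    show ('Q':Char).toNat = 81 from rfl,
    show ('R':Char).toNat = 82 from rfl,
    show ('S':Char).toNat = 83 from rfl,
    show ('T':Char).toNat = 84 from rfl,
    show ('U':Char).toNat = 85 from rfl,
    show ('V':Char).toNat = 86 from rfl,
    show ('W':Char).toNat = 87 from rfl,
    show ('X':Char).toNat = 88 from rfl,
    show ('Y':Char).toNat = 89 from rfl,
    show ('Z':Char).toNat = 90 from rfl,
    show ('a':Char).toNat = 97 from rfl,
    show ('b':Char).toNat = 98 from rfl,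
    show ('c':Char).toNat = 99 from rfl,
    show ('d':Char).toNat = 100 from rfl,
    show ('e':Char).toNat = 101 from rfl,
    show ('f':Char).toNat = 102 from rfl,
    show ('g':Char).toNat = 103 from rfl,
    show ('h':Char).toNat = 104 from rfl,
    show ('i':Char).toNat = 105 from rfl,
    show ('j':Char).toNat = 106 from rfl,
    show ('k':Char).toNat = 107 from rfl,
    show ('l':Char).toNat = 108 from rfl,
    show ('m':Char).toNat = 109 from rfl,
    show ('n':Char).toNat = 110 from rfl,
    show ('o':Char).toNat = 111 from rfl,
    show ('p':Char).toNat = 112 from rfl,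
    show ('q':Char).toNat = 113 from rfl,
    show ('r':Char).toNat = 114 from rfl,
    show ('s':Char).toNat = 115 from rfl,
    show ('t':Char).toNat = 116 from rfl,
    show ('u':Char).toNat = 117 from rfl,
    show ('v':Char).toNat = 118 from rfl,
    show ('w':Char).toNat = 119 from rfl,
    show ('x':Char).toNat = 120 from rfl,
    show ('y':Char).toNat = 121 from rfl,
    show ('z':Char).toNat = 122 from rfl,
    show ('_':Char).toNat = 95 from rfl,
    show ('1':Char).toNat = 49 from rfl,
    show ('2':Char).toNat = 50 from rfl,
    show ('3':Char).toNat = 51 from rfl,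
    show ('4':Char).toNat = 52 from rfl,
    show ('5':Char).toNat = 53 from rfl,
    show ('6':Char).toNat = 54 from rfl,
    show ('7':Char).toNat = 55 from rfl,
    show ('8':Char).toNat = 56 from rfl,
    show ('9':Char).toNat = 57 from rfl,
    show ('0':Char).toNat = 48 from rfl]
  omega

theorem pv_loop_eq (cs : List Char) (s : String) :
    pvLoopA cs false s =
      if (cs.dropWhile pvIsContB).head? = some ':' then
        some (String.ofList (s.toList ++ cs.takeWhile pvIsContB))
      else none := by
  induction cs generalizing s with
  | nil => simp [pvLoopA]
  | cons c rest ih =>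
      by_cases hc : pvIsContB c = true
      · simp [pvLoopA, pv_cont_mem, hc, ih]
      · by_cases h2 : c = ':'
        · subst h2
          simp [pvLoopA, pv_cont_mem, hc]
        · simp [pvLoopA, pv_cont_mem, hc, h2]

-- ===== VERDICT (by name: the statement is the Claim_ definition above) =====
theorem get_get_spec : Claim_equal_get_get := by
  intro line _
  unfold Spec_get_get get_get get_get_alt
  cases h : line.toList with
  | nil => simp [pvLoopA]
  | cons c rest =>
      by_cases hs : pvIsStartB c = true
      · simp [pvLoopA, pv_start_mem, hs, pv_loop_eq]
      · simp [pvLoopA, pv_start_mem, hs]
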